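-- pv_equiv track=rewrite | github.com/alxwen711/contestSubmissionArchive | codeforces/live contests/2025-4/1061/b.py | f
-- ===== SOURCE A (Python) =====
-- def f(n,ar,i):
--     x = i
--     ans = 0
--     while x != 0:
--         if ar[ans % n] == "A":
--             x -= 1
--         else:
--             x //= 2
--         ans += 1
--     return ans
-- ===== SOURCE B (Python) =====
-- def f(n, ar, i):
--     m = min(n, len(ar))  # cells the walk can ever touch
--     if all(ar[j] == "A" for j in range(m)):
--         return i
--     x = i
--     ans = 0
--     while x != 0:
--         p = ans % n
--         if ar[p] == "A":
--             k = 1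
--             while p + k < m and ar[p + k] == "A":
--                 k += 1
--             t = min(k, x)
--             x -= t
--             ans += t
--         else:
--             x //= 2
--             ans += 1
--     return ans
-- ===== Notes on version B (the rewrite author's own statement) =====
-- stated objective: alternative
-- what changed: B short-circuits the all-'A' pattern to return i immediately and otherwise batches each contiguous run of 'A' cells, subtracting min(runlen, x) in one step instead of one-by-one.
-- outside the precondition, e.g. on f(-2, ['A', 'B'], 4): A returns 3, B returns 4; on f(5, ['B', 'B'], 3): A returns 2, B returns 2
import Mathlib
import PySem

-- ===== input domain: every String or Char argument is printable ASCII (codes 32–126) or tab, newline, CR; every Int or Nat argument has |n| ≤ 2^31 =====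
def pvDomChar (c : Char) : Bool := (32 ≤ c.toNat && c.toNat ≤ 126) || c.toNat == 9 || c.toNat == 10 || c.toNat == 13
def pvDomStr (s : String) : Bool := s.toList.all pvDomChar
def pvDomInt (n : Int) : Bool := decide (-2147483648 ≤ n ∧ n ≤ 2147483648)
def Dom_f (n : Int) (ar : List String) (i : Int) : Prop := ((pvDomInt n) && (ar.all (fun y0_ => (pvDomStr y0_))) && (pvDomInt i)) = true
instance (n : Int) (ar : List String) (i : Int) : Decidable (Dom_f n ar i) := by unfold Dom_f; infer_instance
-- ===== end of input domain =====

-- B batches each contiguous run of "A" cells (subtracting min(runlen, x) in one step) and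
-- short-circuits the all-"A" pattern to return i; A does one subtraction/halving per step.

-- ===== PORT A =====
-- while x != 0: if ar[ans % n] == "A": x -= 1 else: x //= 2; ans += 1
-- fuel: x strictly decreases each iteration while x ≥ 1, so i.toNat + 1 steps suffice on Pre_.
def fA_loop (n : Int) (ar : List String) : Nat → Int → Int → Int
  | 0, _, ans => ans
  | fuel+1, x, ans =>
      if x ≠ 0 then
        if PySem.List.pyGetD ar (PySem.Int.mod ans n) "" == "A" then
          fA_loop n ar fuel (x - 1) (ans + 1)
        else
          fA_loop n ar fuel (PySem.Int.floordiv x 2) (ans + 1)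
      else ans

def f (n : Int) (ar : List String) (i : Int) : Int := fA_loop n ar (i.toNat + 1) i 0

-- ===== PORT B =====
-- k = 1; while p + k < m and ar[p + k] == "A": k += 1
-- (inner scan; at most m iterations on Pre_, which is the fuel fB_loop passes)
def fB_run (m : Int) (ar : List String) (p : Int) : Nat → Int → Int
  | 0, k => k
  | fuel+1, k =>
      if p + k < m ∧ PySem.List.pyGetD ar (p + k) "" == "A" then
        fB_run m ar p fuel (k + 1)
      else k

-- outer while loop of B; each iteration decreases x by ≥ 1 while x ≥ 1, so i.toNat + 1 steps suffice.
def fB_loop (n m : Int) (ar : List String) : Nat → Int → Int → Int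
  | 0, _, ans => ans
  | fuel+1, x, ans =>
      if x ≠ 0 then
        let p := PySem.Int.mod ans n
        if PySem.List.pyGetD ar p "" == "A" then
          let k := fB_run m ar p m.toNat 1
          let t := min k x
          fB_loop n m ar fuel (x - t) (ans + t)
        else
          fB_loop n m ar fuel (PySem.Int.floordiv x 2) (ans + 1)
      else ans

def f_alt (n : Int) (ar : List String) (i : Int) : Int :=
  let m := min n (ar.length : Int)
  if (PySem.List.pyRange 0 m).all (fun j => PySem.List.pyGetD ar j "" == "A") then i
  else fB_loop n m ar (i.toNat + 1) i 0

-- ===== PRECONDITION & SPEC =====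
-- Pre_ excludes negative i (A loops forever), non-positive n (ZeroDivisionError for n = 0,
-- accidental negative-index wraparound for n < 0), and the n > len(ar) runs with i > len(ar)
-- (there A raises IndexError on some walks; whether it returns depends on the walk, not on a
-- closed-form input condition). It admits i = 0 (A returns 0 without touching ar), the whole
-- well-formed region 1 ≤ n ≤ len(ar) with i ≥ 0, and n > len(ar) with 0 ≤ i ≤ len(ar)
-- (at most i < n unwrapped steps happen, all in range).
def Pre_f (n : Int) (ar : List String) (i : Int) : Prop :=
  i = 0 ∨ (1 ≤ n ∧ 0 ≤ i ∧ (n ≤ ar.length ∨ i ≤ ar.length))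
instance (n : Int) (ar : List String) (i : Int) : Decidable (Pre_f n ar i) := by
  unfold Pre_f; infer_instance

def pvWitness_f : Int × List String × Int := (2, ["A", "B"], 5)

def Spec_f (n : Int) (ar : List String) (i : Int) (out : Int) : Prop := out = f_alt n ar i
instance (n : Int) (ar : List String) (i : Int) (out : Int) : Decidable (Spec_f n ar i out) := by
  unfold Spec_f; infer_instance

-- ===== CLAIM (what is proved, stated in full; the proofs are below) =====
def Claim_equal_f : Prop := ∀ (n : Int) (ar : List String) (i : Int), Dom_f n ar i → Pre_f n ar i → Spec_f n ar i (f n ar i)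

-- ===== LEMMAS AND PROOFS =====

-- A's loop result does not depend on the fuel, as long as fuel > x.toNat.
lemma fA_fuel (n : Int) (ar : List String) :
    ∀ (fuel₁ fuel₂ : Nat) (x ans : Int), 0 ≤ x → x.toNat < fuel₁ → x.toNat < fuel₂ →
      fA_loop n ar fuel₁ x ans = fA_loop n ar fuel₂ x ans := by
  intro fuel₁
  induction fuel₁ with
  | zero => intro fuel₂ x ans hx h1 h2; omega
  | succ f₁ ih =>
    intro fuel₂ x ans hx h1 h2
    cases fuel₂ with
    | zero => omega
    | succ f₂ =>
      by_cases hx0 : x = 0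
      · simp [fA_loop, hx0]
      · have hx1 : 1 ≤ x := by omega
        simp only [fA_loop, if_pos hx0]
        by_cases hc : (PySem.List.pyGetD ar (PySem.Int.mod ans n) "" == "A") = true
        · rw [if_pos hc, if_pos hc]
          exact ih f₂ (x - 1) (ans + 1) (by omega) (by omega) (by omega)
        · rw [if_neg hc, if_neg hc]
          rw [PySem.Int.floordiv_eq_ediv_of_pos (by omega : (0:Int) < 2)]
          exact ih f₂ (x / 2) (ans + 1) (by omega) (by omega) (by omega)

-- fB_run never decreases the counter.
lemma fB_run_ge (m : Int) (ar : List String) (p : Int) :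
    ∀ (fuel : Nat) (k : Int), k ≤ fB_run m ar p fuel k := by
  intro fuel
  induction fuel with
  | zero => intro k; simp [fB_run]
  | succ f ih =>
    intro k
    simp only [fB_run]
    split
    · exact le_trans (by omega) (ih (k + 1))
    · exact le_refl k

-- every index strictly below the returned counter satisfies the scanned property.
lemma fB_run_all (m : Int) (ar : List String) (p : Int) :
    ∀ (fuel : Nat) (k : Int),
      (∀ j : Int, 0 ≤ j → j < k → p + j < m ∧ (PySem.List.pyGetD ar (p + j) "" == "A") = true) →
      ∀ j : Int, 0 ≤ j → j < fB_run m ar p fuel k →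
        p + j < m ∧ (PySem.List.pyGetD ar (p + j) "" == "A") = true := by
  intro fuel
  induction fuel with
  | zero =>
    intro k hk j hj0 hj
    simp only [fB_run] at hj
    exact hk j hj0 hj
  | succ f ih =>
    intro k hk j hj0 hj
    simp only [fB_run] at hj
    split at hj
    case isTrue h =>
      refine ih (k + 1) ?_ j hj0 hj
      intro j' hj0' hj1'
      by_cases hjk : j' = k
      · subst hjk; exact ⟨h.1, h.2⟩
      · exact hk j' hj0' (by omega)
    case isFalse h => exact hk j hj0 hj

-- B's loop result does not depend on the fuel, as long as fuel > x.toNat.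
lemma fB_fuel (n m : Int) (ar : List String) :
    ∀ (fuel₁ fuel₂ : Nat) (x ans : Int), 0 ≤ x → x.toNat < fuel₁ → x.toNat < fuel₂ →
      fB_loop n m ar fuel₁ x ans = fB_loop n m ar fuel₂ x ans := by
  intro fuel₁
  induction fuel₁ with
  | zero => intro fuel₂ x ans hx h1 h2; omega
  | succ f₁ ih =>
    intro fuel₂ x ans hx h1 h2
    cases fuel₂ with
    | zero => omega
    | succ f₂ =>
      by_cases hx0 : x = 0
      · simp [fB_loop, hx0]
      · have hx1 : 1 ≤ x := by omega
        simp only [fB_loop, if_pos hx0]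
        by_cases hc : (PySem.List.pyGetD ar (PySem.Int.mod ans n) "" == "A") = true
        · rw [if_pos hc, if_pos hc]
          have hk1 : 1 ≤ fB_run m ar (PySem.Int.mod ans n) m.toNat 1 :=
            fB_run_ge m ar (PySem.Int.mod ans n) m.toNat 1
          have ht1 : 1 ≤ min (fB_run m ar (PySem.Int.mod ans n) m.toNat 1) x := by
            simp only [le_min_iff]; exact ⟨hk1, hx1⟩
          have ht2 : min (fB_run m ar (PySem.Int.mod ans n) m.toNat 1) x ≤ x := min_le_right _ _
          exact ih f₂ _ _ (by omega) (by omega) (by omega)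
        · rw [if_neg hc, if_neg hc]
          rw [PySem.Int.floordiv_eq_ediv_of_pos (by omega : (0:Int) < 2)]
          exact ih f₂ (x / 2) (ans + 1) (by omega) (by omega) (by omega)

-- t consecutive "A" steps of A's loop, taken at once.
lemma fA_batch (n : Int) (ar : List String) :
    ∀ (t : Nat) (fuel : Nat) (x ans : Int), (t : Int) ≤ x → t ≤ fuel →
      (∀ j : Nat, j < t → (PySem.List.pyGetD ar (PySem.Int.mod (ans + j) n) "" == "A") = true) →
      fA_loop n ar fuel x ans = fA_loop n ar (fuel - t) (x - (t : Int)) (ans + (t : Int)) := by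
  intro t
  induction t with
  | zero => intro fuel x ans h1 h2 h3; simp
  | succ t ih =>
    intro fuel x ans h1 h2 h3
    cases fuel with
    | zero => omega
    | succ f =>
      have h1' : (t : Int) + 1 ≤ x := by push_cast at h1; omega
      have hx0 : x ≠ 0 := by omega
      have hA := h3 0 (by omega)
      simp only [Nat.cast_zero, add_zero] at hA
      simp only [fA_loop, if_pos hx0, if_pos hA]
      rw [ih f (x - 1) (ans + 1) (by omega) (by omega)
        (fun j hj => by
          have := h3 (j + 1) (by omega)
          have harg : ans + ((j : Nat) + 1 : Nat) = ans + 1 + (j : Int) := by push_cast; ring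
          rwa [harg] at this)]
      congr 1
      · omega
      · push_cast; ring
      · push_cast; ring

-- shifting inside a run keeps the modulus literal: (ans + j) % n = (ans % n) + j.
lemma mod_shift (n ans : Int) (j : Nat) (hn : 1 ≤ n)
    (hj : PySem.Int.mod ans n + j < n) :
    PySem.Int.mod (ans + j) n = PySem.Int.mod ans n + j := by
  rw [PySem.Int.mod_eq_emod_of_pos (by omega)] at hj ⊢
  rw [PySem.Int.mod_eq_emod_of_pos (by omega)]
  have h0 : 0 ≤ ans % n := Int.emod_nonneg ans (by omega)
  conv_lhs => rw [show ans = n * (ans / n) + ans % n from (Int.mul_ediv_add_emod ans n).symm]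
  rw [show n * (ans / n) + ans % n + (j : Int) = ans % n + (j : Int) + n * (ans / n) by ring]
  rw [Int.add_mul_emod_self_left]
  exact Int.emod_eq_of_lt (by omega) hj

-- the walked index ans % n stays below m (either m = n, or the walk never wraps).
lemma mod_lt_m (n m ans x : Int) (hn : 1 ≤ n) (hmn : m ≤ n) (hx1 : 1 ≤ x)
    (hreg : n ≤ m ∨ (0 ≤ ans ∧ ans + x ≤ m)) :
    PySem.Int.mod ans n < m := by
  have hpn : PySem.Int.mod ans n < n := PySem.Int.mod_lt ans (by omega)
  rcases hreg with h | ⟨ha0, ham⟩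
  · omega
  · rw [PySem.Int.mod_eq_emod_of_pos (by omega), Int.emod_eq_of_lt ha0 (by omega)]
    omega

-- all cells below m are "A": A's loop just counts x down to 0.
lemma fA_allA (n m : Int) (ar : List String) (hn : 1 ≤ n) (hmn : m ≤ n)
    (hall : ((PySem.List.pyRange 0 m).all (fun j => PySem.List.pyGetD ar j "" == "A")) = true) :
    ∀ (fuel : Nat) (x ans : Int), 0 ≤ x → x.toNat < fuel →
      (n ≤ m ∨ (0 ≤ ans ∧ ans + x ≤ m)) →
      fA_loop n ar fuel x ans = ans + x := by
  intro fuel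
  induction fuel with
  | zero => intro x ans hx h _; omega
  | succ f ih =>
    intro x ans hx hf hreg
    by_cases hx0 : x = 0
    · simp [fA_loop, hx0]
    · have hx1 : 1 ≤ x := by omega
      have hp0 : 0 ≤ PySem.Int.mod ans n := PySem.Int.mod_nonneg ans (by omega)
      have hpm : PySem.Int.mod ans n < m := mod_lt_m n m ans x hn hmn hx1 hreg
      have hc : (PySem.List.pyGetD ar (PySem.Int.mod ans n) "" == "A") = true := by
        refine List.all_eq_true.mp hall (PySem.Int.mod ans n) ?_
        exact PySem.List.mem_pyRange_one.mpr ⟨hp0, hpm⟩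
      simp only [fA_loop, if_pos hx0, if_pos hc]
      rw [ih (x - 1) (ans + 1) (by omega) (by omega)
        (by rcases hreg with h | h; exacts [Or.inl h, Or.inr (by omega)])]
      ring

-- main equivalence of the two loops, by strong induction on x; the region hypothesis keeps
-- every visited index below m = min(n, len(ar)) (either m = n, or the walk never wraps).
lemma main_loop (n m : Int) (ar : List String) (hn : 1 ≤ n) (hmn : m ≤ n) :
    ∀ (cnt : Nat) (x ans : Int), x.toNat = cnt → 0 ≤ x →
      (n ≤ m ∨ (0 ≤ ans ∧ ans + x ≤ m)) →
      fA_loop n ar (x.toNat + 1) x ans = fB_loop n m ar (x.toNat + 1) x ans := by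
  intro cnt
  induction cnt using Nat.strong_induction_on with
  | _ cnt ih =>
    intro x ans hm hx hreg
    by_cases hx0 : x = 0
    · simp [fA_loop, fB_loop, hx0]
    · have hx1 : 1 ≤ x := by omega
      have hp0 : 0 ≤ PySem.Int.mod ans n := PySem.Int.mod_nonneg ans (by omega)
      have hpn : PySem.Int.mod ans n < n := PySem.Int.mod_lt ans (by omega)
      have hpm : PySem.Int.mod ans n < m := mod_lt_m n m ans x hn hmn hx1 hreg
      by_cases hA : (PySem.List.pyGetD ar (PySem.Int.mod ans n) "" == "A") = true
      · -- batch of "A" steps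
        have hk1 : 1 ≤ fB_run m ar (PySem.Int.mod ans n) m.toNat 1 :=
          fB_run_ge m ar (PySem.Int.mod ans n) m.toNat 1
        set k := fB_run m ar (PySem.Int.mod ans n) m.toNat 1 with hkdef
        set t := min k x with htdef
        have ht1 : 1 ≤ t := by simp only [htdef, le_min_iff]; exact ⟨hk1, hx1⟩
        have htx : t ≤ x := min_le_right _ _
        have htk : t ≤ k := min_le_left _ _
        have hrun : ∀ j : Int, 0 ≤ j → j < k →
            PySem.Int.mod ans n + j < m ∧
              (PySem.List.pyGetD ar (PySem.Int.mod ans n + j) "" == "A") = true := by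
          refine fB_run_all m ar (PySem.Int.mod ans n) m.toNat 1 ?_
          intro j hj0 hj1
          have hj00 : j = 0 := by omega
          subst hj00
          exact ⟨by omega, by simpa using hA⟩
        have hsteps : ∀ j : Nat, j < t.toNat →
            (PySem.List.pyGetD ar (PySem.Int.mod (ans + j) n) "" == "A") = true := by
          intro j hj
          have hjk : (j : Int) < k := by omega
          have hr := hrun j (by omega) hjk
          rw [mod_shift n ans j hn (by omega)]
          exact hr.2
        have hbatch := fA_batch n ar t.toNat (x.toNat + 1) x ans
          (by omega) (by omega) hsteps
        rw [Int.toNat_of_nonneg (by omega)] at hbatch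
        have hBstep : fB_loop n m ar (x.toNat + 1) x ans
            = fB_loop n m ar x.toNat (x - t) (ans + t) := by
          simp only [fB_loop, if_pos hx0]
          rw [if_pos hA]
        rw [hbatch, hBstep]
        have hxt0 : 0 ≤ x - t := by omega
        rw [fA_fuel n ar (x.toNat + 1 - t.toNat) ((x - t).toNat + 1) (x - t) (ans + t)
            hxt0 (by omega) (by omega),
          fB_fuel n m ar x.toNat ((x - t).toNat + 1) (x - t) (ans + t)
            hxt0 (by omega) (by omega)]
        exact ih (x - t).toNat (by omega) (x - t) (ans + t) rfl hxt0
          (by rcases hreg with h | h; exacts [Or.inl h, Or.inr (by omega)])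
      · -- halving step both
        simp only [fA_loop, fB_loop, if_pos hx0, if_neg hA]
        rw [PySem.Int.floordiv_eq_ediv_of_pos (by omega : (0:Int) < 2)]
        rw [fA_fuel n ar x.toNat ((x / 2).toNat + 1) (x / 2) (ans + 1)
            (by omega) (by omega) (by omega),
          fB_fuel n m ar x.toNat ((x / 2).toNat + 1) (x / 2) (ans + 1)
            (by omega) (by omega) (by omega)]
        exact ih (x / 2).toNat (by omega) (x / 2) (ans + 1) rfl (by omega)
          (by rcases hreg with h | h; exacts [Or.inl h, Or.inr (by omega)])

-- ===== VERDICT (by name: the statement is the Claim_ definition above) =====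
theorem f_spec : Claim_equal_f := by
  intro n ar i hDom hPre
  unfold Spec_f f f_alt
  rcases hPre with h0 | ⟨hn, hi, hreg⟩
  · subst h0
    by_cases h : ((PySem.List.pyRange 0 (min n (ar.length : Int))).all
        (fun j => PySem.List.pyGetD ar j "" == "A")) = true <;>
      simp [fA_loop, fB_loop, h]
  · have hmn : min n (ar.length : Int) ≤ n := min_le_left _ _
    have hreg' : n ≤ min n (ar.length : Int) ∨
        (0 ≤ (0:Int) ∧ (0:Int) + i ≤ min n (ar.length : Int)) := by
      by_cases hc : n ≤ (ar.length : Int)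
      · exact Or.inl (by omega)
      · rcases hreg with h | h
        · exact Or.inl (by omega)
        · exact Or.inr ⟨le_refl 0, by omega⟩
    by_cases hall : ((PySem.List.pyRange 0 (min n (ar.length : Int))).all
        (fun j => PySem.List.pyGetD ar j "" == "A")) = true
    · simp only [hall, if_pos]
      rw [fA_allA n (min n (ar.length : Int)) ar hn hmn hall (i.toNat + 1) i 0 hi
        (by omega) hreg']
      simp
    · simp only [hall, Bool.false_eq_true, if_false]
      exact main_loop n (min n (ar.length : Int)) ar hn hmn i.toNat i 0 rfl hi hreg'
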